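-- pv_equiv track=rewrite | github.com/Tidiane971/ZeldaLike | ennemi_gestion.py | dBox
-- ===== SOURCE A (Python) =====
-- def dBox(num, T):
--     coord = [0,0]
--     k=0
--     for i in range(len(T)):
--         for j in range(len(T[i])):
--             if T[i][j] == 6:
--                 k+=1
--                 if k == num:
--                     coord[0] = j
--                     coord[1] = i
--                     return coord
-- ===== SOURCE B (Python) =====
-- def dBox(num, T):
--     matches = [[j, i] for i, row in enumerate(T) for j, c in enumerate(row) if c == 6]
--     return matches[num - 1] if 1 <= num <= len(matches) else None
-- ===== Notes on version B (the rewrite author's own statement) =====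
-- stated objective: simpler
-- what changed: Replaces the early-exit counting scan over nested index loops with a single comprehension collecting all coordinates of 6-cells, followed by a guarded index matches[num-1].
import Mathlib
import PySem

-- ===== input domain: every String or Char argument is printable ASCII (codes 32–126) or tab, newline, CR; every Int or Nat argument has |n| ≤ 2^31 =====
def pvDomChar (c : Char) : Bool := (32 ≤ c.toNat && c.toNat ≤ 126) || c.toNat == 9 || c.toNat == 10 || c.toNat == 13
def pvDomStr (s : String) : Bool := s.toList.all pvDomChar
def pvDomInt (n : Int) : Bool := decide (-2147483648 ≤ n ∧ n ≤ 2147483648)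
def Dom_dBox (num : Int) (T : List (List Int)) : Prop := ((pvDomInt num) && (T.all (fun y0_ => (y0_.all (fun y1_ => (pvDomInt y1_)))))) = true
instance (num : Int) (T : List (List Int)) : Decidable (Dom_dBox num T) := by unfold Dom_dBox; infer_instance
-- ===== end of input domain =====

-- B collects all coordinates of 6-cells in one pass and indexes, instead of A's early-exit counting scan (objective: simpler).

-- ===== PORT A =====
-- inner loop over one row: counts 6s in k, returns (some [j,i], k) on the num-th 6
def dBoxRowA (num i : Int) : Int → List Int → Int → (Option (List Int) × Int)
  | _, [], k => (none, k)
  | j, c :: rest, k =>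
    if c = 6 then
      if k + 1 = num then (some [j, i], k + 1)
      else dBoxRowA num i (j + 1) rest (k + 1)
    else dBoxRowA num i (j + 1) rest k

-- outer loop over rows, threading the counter k
def dBoxRowsA (num : Int) : Int → List (List Int) → Int → Option (List Int)
  | _, [], _ => none
  | i, r :: rest, k =>
    match dBoxRowA num i 0 r k with
    | (some res, _) => some res
    | (none, k') => dBoxRowsA num (i + 1) rest k'

def dBox (num : Int) (T : List (List Int)) : Option (List Int) :=
  dBoxRowsA num 0 T 0

-- ===== PORT B =====
def dBox_alt (num : Int) (T : List (List Int)) : Option (List Int) :=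
  let ms := (PySem.List.enumerate T 0).flatMap
    (fun p => (PySem.List.enumerate p.2 0).filterMap
      (fun q => if q.2 = 6 then some [q.1, p.1] else none))
  if 1 ≤ num ∧ num ≤ ms.length then ms[(num - 1).toNat]? else none

-- ===== PRECONDITION & SPEC =====
def Spec_dBox (num : Int) (T : List (List Int)) (out : Option (List Int)) : Prop := out = dBox_alt num T
instance (num : Int) (T : List (List Int)) (out : Option (List Int)) : Decidable (Spec_dBox num T out) := by unfold Spec_dBox; infer_instance

-- ===== CLAIM (what is proved, stated in full; the proofs are below) =====
def Claim_equal_dBox : Prop := ∀ (num : Int) (T : List (List Int)), Dom_dBox num T → Spec_dBox num T (dBox num T)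

-- ===== LEMMAS AND PROOFS =====

-- the matches contributed by one row, as B computes them
def mRow (i j : Int) (cells : List Int) : List (List Int) :=
  (PySem.List.enumerate cells j).filterMap (fun q => if q.2 = 6 then some [q.1, i] else none)

def mRows (i : Int) (rows : List (List Int)) : List (List Int) :=
  (PySem.List.enumerate rows i).flatMap (fun p => mRow p.1 0 p.2)

theorem mRow_nil (i j : Int) : mRow i j [] = [] := by
  simp [mRow, PySem.List.enumerate_nil]

theorem mRow_cons_six (i j : Int) (rest : List Int) :
    mRow i j (6 :: rest) = [j, i] :: mRow i (j + 1) rest := by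
  simp [mRow, PySem.List.enumerate_cons]

theorem mRow_cons_ne (i j c : Int) (rest : List Int) (hc : c ≠ 6) :
    mRow i j (c :: rest) = mRow i (j + 1) rest := by
  simp [mRow, PySem.List.enumerate_cons, hc]

theorem mRows_nil (i : Int) : mRows i [] = [] := by
  simp [mRows, PySem.List.enumerate_nil]

theorem mRows_cons (i : Int) (r : List Int) (rest : List (List Int)) :
    mRows i (r :: rest) = mRow i 0 r ++ mRows (i + 1) rest := by
  simp [mRows, PySem.List.enumerate_cons]

theorem dBoxRowA_eq (num i : Int) (cells : List Int) :
    ∀ (j k : Int),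
      dBoxRowA num i j cells k =
        if k < num ∧ num ≤ k + (mRow i j cells).length
        then ((mRow i j cells)[(num - k - 1).toNat]?, num)
        else (none, k + (mRow i j cells).length) := by
  induction cells with
  | nil =>
    intro j k
    rw [mRow_nil]
    simp only [dBoxRowA, List.length_nil]
    rw [if_neg (by push_cast; omega)]
    simp
  | cons c rest ih =>
    intro j k
    by_cases hc : c = 6
    · subst hc
      rw [mRow_cons_six]
      simp only [dBoxRowA]
      by_cases hk : k + 1 = num
      · rw [if_pos hk]
        have hnum : (num - k - 1).toNat = 0 := by omega
        rw [if_pos (show k < num ∧ num ≤ k + (([j, i] :: mRow i (j + 1) rest).length : Int) by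
          simp only [List.length_cons]; push_cast; omega)]
        simp [hnum, hk]
      · rw [if_neg hk, ih (j + 1) (k + 1)]
        by_cases hcond : k + 1 < num ∧ num ≤ (k + 1) + ((mRow i (j + 1) rest).length : Int)
        · rw [if_pos hcond,
            if_pos (show k < num ∧ num ≤ k + (([j, i] :: mRow i (j + 1) rest).length : Int) by
              simp only [List.length_cons]; push_cast; omega)]
          have h1 : (num - k - 1).toNat = (num - (k + 1) - 1).toNat + 1 := by omega
          simp [h1]
        · rw [if_neg hcond,
            if_neg (show ¬(k < num ∧ num ≤ k + (([j, i] :: mRow i (j + 1) rest).length : Int)) by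
              simp only [List.length_cons]; push_cast at *; omega)]
          refine Prod.ext rfl ?_
          simp only [List.length_cons]
          push_cast
          omega
    · rw [mRow_cons_ne i j c rest hc]
      simp only [dBoxRowA, if_neg hc]
      exact ih (j + 1) k

theorem dBoxRowsA_eq (num : Int) (rows : List (List Int)) :
    ∀ (i k : Int),
      dBoxRowsA num i rows k =
        if k < num ∧ num ≤ k + (mRows i rows).length
        then (mRows i rows)[(num - k - 1).toNat]?
        else none := by
  induction rows with
  | nil =>
    intro i k
    rw [mRows_nil]
    simp only [dBoxRowsA, List.length_nil]
    rw [if_neg (by push_cast; omega)]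
  | cons r rest ih =>
    intro i k
    rw [mRows_cons]
    simp only [dBoxRowsA]
    rw [dBoxRowA_eq]
    by_cases h1 : k < num ∧ num ≤ k + ((mRow i 0 r).length : Int)
    · rw [if_pos h1]
      have hlt : (num - k - 1).toNat < (mRow i 0 r).length := by omega
      have hx : (mRow i 0 r)[(num - k - 1).toNat]? = some (mRow i 0 r)[(num - k - 1).toNat] :=
        List.getElem?_eq_getElem hlt
      rw [hx,
        if_pos (show k < num ∧ num ≤ k + ((mRow i 0 r ++ mRows (i + 1) rest).length : Int) by
          simp only [List.length_append]; push_cast; omega),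
        List.getElem?_append_left hlt, hx]
    · rw [if_neg h1]
      simp only [ih]
      by_cases h2 : k + ((mRow i 0 r).length : Int) < num ∧
          num ≤ k + ((mRow i 0 r).length : Int) + ((mRows (i + 1) rest).length : Int)
      · rw [if_pos h2,
          if_pos (show k < num ∧ num ≤ k + ((mRow i 0 r ++ mRows (i + 1) rest).length : Int) by
            simp only [List.length_append]; push_cast; omega)]
        have hge : (mRow i 0 r).length ≤ (num - k - 1).toNat := by omega
        rw [List.getElem?_append_right hge]
        congr 1
        omega
      · rw [if_neg h2,
          if_neg (show ¬(k < num ∧ num ≤ k + ((mRow i 0 r ++ mRows (i + 1) rest).length : Int)) by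
            simp only [List.length_append]; push_cast at *; omega)]

-- ===== VERDICT (by name: the statement is the Claim_ definition above) =====
theorem dBox_spec : Claim_equal_dBox := by
  intro num T _
  show dBox num T = dBox_alt num T
  rw [dBox, dBoxRowsA_eq]
  have hm : mRows 0 T = (PySem.List.enumerate T 0).flatMap
      (fun p => (PySem.List.enumerate p.2 0).filterMap
        (fun q => if q.2 = 6 then some [q.1, p.1] else none)) := rfl
  rw [dBox_alt]
  simp only [← hm]
  by_cases h : 1 ≤ num ∧ num ≤ ((mRows 0 T).length : Int)
  · rw [if_pos (by omega : (0:Int) < num ∧ num ≤ 0 + ((mRows 0 T).length : Int)), if_pos h]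
    congr 2
    omega
  · rw [if_neg (by omega : ¬((0:Int) < num ∧ num ≤ 0 + ((mRows 0 T).length : Int))), if_neg h]
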